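-- pv_equiv track=rewrite | github.com/mt798jx/isi-zadanie-2 | pom.py | dfs_solve
-- ===== SOURCE A (Python) =====
-- def is_valid(grid, x, y, visited):
--     size = len(grid)
--     return 0 <= x < size and 0 <= y < size and grid[x][y] == 0 and (x, y) not in visited
--
-- def dfs_island(grid, x, y, target_size, visited):
--     if len(visited) == target_size:
--         return True
--
--     directions = [(0, 1), (1, 0), (0, -1), (-1, 0)]  # Smer pohybu
--     for dx, dy in directions:
--         nx, ny = x + dx, y + dy
--         if is_valid(grid, nx, ny, visited):
--             visited.add((nx, ny))
--             if dfs_island(grid, nx, ny, target_size, visited):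
--                 return True
--             visited.remove((nx, ny))
--     return False
--
-- def dfs_solve(grid, current_grid, x, y):
--     size = len(grid)
--     if x == size:  # Ak sa dostaneme mimo maticu, riešenie je platné
--         return True
--
--     next_x, next_y = (x + 1, 0) if y + 1 == size else (x, y + 1)  # Prechod na ďalšie políčko
--
--     if grid[x][y] > 0:  # Ak je na políčku číslo (ostrov)
--         visited = set()
--         visited.add((x, y))
--         if not dfs_island(current_grid, x, y, grid[x][y], visited):  # Skús vytvoriť ostrov
--             return False
--         for vx, vy in visited:  # Označ ostrov ako vyplnený
--             current_grid[vx][vy] = 1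
--         if dfs_solve(grid, current_grid, next_x, next_y):
--             return True
--         for vx, vy in visited:  # Vráť zmeny späť
--             current_grid[vx][vy] = 0
--     else:  # Ak je políčko prázdne, môže byť more alebo ostrov
--         current_grid[x][y] = -1  # Skús označiť ako more
--         if dfs_solve(grid, current_grid, next_x, next_y):
--             return True
--         current_grid[x][y] = 0  # Vráť zmeny späť
--     return False
-- ===== SOURCE B (Python) =====
-- def _find_island(cur, x, y, target):
--     # Iterative self-avoiding-walk search with an explicit stack; entries carry
--     # the walk's last cell and the frozenset of cells on the walk.  Neighbours are
--     # pushed in reversed direction order so pops visit them in the recursive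
--     # DFS order, hence the first walk found is the same one.
--     size = len(cur)
--     stack = [((x, y), frozenset([(x, y)]))]
--     while stack:
--         (cx, cy), path = stack.pop()
--         if len(path) == target:
--             return set(path)
--         for dx, dy in ((-1, 0), (0, -1), (1, 0), (0, 1)):
--             nx, ny = cx + dx, cy + dy
--             if 0 <= nx < size and 0 <= ny < size and cur[nx][ny] == 0 \
--                     and (nx, ny) not in path:
--                 stack.append(((nx, ny), path | {(nx, ny)}))
--     return None
--
-- def dfs_solve(grid, current_grid, x, y):
--     size = len(grid)
--     if x == size:
--         return True
--     next_x, next_y = (x + 1, 0) if y + 1 == size else (x, y + 1)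
--     # Unified placement: both branches pick a set of cells and a value to write.
--     if grid[x][y] > 0:
--         cells = _find_island(current_grid, x, y, grid[x][y])
--         if cells is None:
--             return False
--         value = 1
--     else:
--         cells = {(x, y)}
--         value = -1
--     saved = {c: current_grid[c[0]][c[1]] for c in cells}
--     for cx, cy in cells:
--         current_grid[cx][cy] = value
--     ok = dfs_solve(grid, current_grid, next_x, next_y)
--     for (cx, cy), v in saved.items():
--         current_grid[cx][cy] = v
--     return ok
-- ===== Notes on version B (the rewrite author's own statement) =====
-- stated objective: alternative
-- what changed: The recursive backtracking island search dfs_island is replaced by an iterative explicit-stack search over (last-cell, path-set) entries (pushed in reversed direction order so the same first walk is found), and dfs_solve's two branches are folded into one generic place-cells-then-recurse step.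
-- outside the precondition, e.g. on dfs_solve([[0, 0], [0, 2]], [[0, 0], [0]], 0, 0): A returns False, B returns False; on dfs_solve([[1]], [[0]], -2, 0): A raises IndexError, B raises IndexError
import Mathlib
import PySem

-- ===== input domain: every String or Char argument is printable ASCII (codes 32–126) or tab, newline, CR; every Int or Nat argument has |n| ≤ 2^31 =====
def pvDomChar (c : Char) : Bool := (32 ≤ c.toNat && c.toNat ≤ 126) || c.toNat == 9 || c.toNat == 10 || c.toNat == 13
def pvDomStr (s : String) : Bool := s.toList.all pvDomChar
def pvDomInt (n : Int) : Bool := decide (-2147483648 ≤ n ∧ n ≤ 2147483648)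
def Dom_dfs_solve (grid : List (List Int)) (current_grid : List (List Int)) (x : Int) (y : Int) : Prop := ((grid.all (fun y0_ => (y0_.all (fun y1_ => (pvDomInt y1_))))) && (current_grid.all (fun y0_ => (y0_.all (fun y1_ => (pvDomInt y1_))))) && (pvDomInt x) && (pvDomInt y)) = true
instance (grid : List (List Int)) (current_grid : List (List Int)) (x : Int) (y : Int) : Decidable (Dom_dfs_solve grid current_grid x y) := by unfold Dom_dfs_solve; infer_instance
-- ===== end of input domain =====

-- B replaces the recursive self-avoiding-walk search dfs_island by an explicit-stack
-- iteration over (cell, path) entries and folds dfs_solve's two branches into one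
-- generic placement step; equivalence is about the RETURN value only (both Pythons
-- mutate current_grid in place, A leaves the marks on success while B restores them).

-- shared cell accessor: Python's g[x][y] (negative-index wrap; none = IndexError)
def pvCell? (g : List (List Int)) (x y : Int) : Option Int :=
  (PySem.List.pyGet? g x).bind (fun row => PySem.List.pyGet? row y)

-- shared cell write: Python's g[x][y] = v (no-op where Python raises; outside Pre_)
def pvSetCell (g : List (List Int)) (x y v : Int) : List (List Int) :=
  match PySem.List.pyGet? g x with
  | none => g
  | some row => PySem.List.pySetD g x (PySem.List.pySetD row y v)

-- ===== PORT A =====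
-- is_valid(grid, x, y, visited); short-circuit bounds guard exactly as in Python
def pv_is_valid (grid : List (List Int)) (x y : Int) (visited : PySem.Set (Int × Int)) : Bool :=
  decide (0 ≤ x) && decide (x < (grid.length : Int)) &&
  decide (0 ≤ y) && decide (y < (grid.length : Int)) &&
  (pvCell? grid x y == some 0) && !(PySem.Set.contains visited (x, y))

-- dfs_island / its direction loop; fuel only guards termination (the passed fuel
-- n*n+1 is never exhausted: the visited set grows with each nested call and holds
-- at most n*n in-range cells plus the start cell).  Python's visited.add/… mutation
-- with remove-on-failure is rendered functionally: the failed branch resumes with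
-- the caller's saved set, which is exactly what add-then-remove leaves behind.
mutual
def pv_dfs_island (cur : List (List Int)) (fuel : Nat) (x y : Int) (target : Int)
    (visited : PySem.Set (Int × Int)) : Bool × PySem.Set (Int × Int) :=
  match fuel with
  | 0 => (false, visited)
  | fuel + 1 =>
    if ((visited.length : Int) == target) then (true, visited)
    else
      match pv_try_dirs cur fuel x y target visited [((0:Int),(1:Int)), (1,0), (0,-1), (-1,0)] with
      | some v => (true, v)
      | none => (false, visited)

def pv_try_dirs (cur : List (List Int)) (fuel : Nat) (x y : Int) (target : Int)
    (visited : PySem.Set (Int × Int)) (dirs : List (Int × Int)) : Option (PySem.Set (Int × Int)) :=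
  match dirs with
  | [] => none
  | d :: rest =>
    let nx := x + d.1
    let ny := y + d.2
    if pv_is_valid cur nx ny visited then
      match pv_dfs_island cur fuel nx ny target (PySem.Set.add visited (nx, ny)) with
      | (true, v) => some v
      | (false, _) => pv_try_dirs cur fuel x y target visited rest
    else pv_try_dirs cur fuel x y target visited rest
end

-- dfs_solve; fuel bounds the row-major walk (sufficient for every start admitted by
-- Pre_).  The unmark loops of A only undo mutation after the result is fixed, so
-- they drop out of the functional rendering.
def pv_dfs_solve_rec (grid : List (List Int)) (fuel : Nat) (current_grid : List (List Int))
    (x y : Int) : Bool :=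
  match fuel with
  | 0 => false
  | fuel + 1 =>
    if (x == (grid.length : Int)) then true
    else
      let next := if (y + 1 == (grid.length : Int)) then (x + 1, (0 : Int)) else (x, y + 1)
      match pvCell? grid x y with
      | none => false   -- Python raises IndexError here; excluded by Pre_
      | some v =>
        if v > 0 then
          let visited : PySem.Set (Int × Int) := PySem.Set.add PySem.Set.empty (x, y)
          match pv_dfs_island current_grid (current_grid.length * current_grid.length + 1) x y v visited with
          | (false, _) => false
          | (true, vis) =>
            -- 'for vx, vy in visited: current_grid[vx][vy] = 1' (order-independent writes)
            let cur' := vis.foldl (fun g c => pvSetCell g c.1 c.2 1) current_grid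
            pv_dfs_solve_rec grid fuel cur' next.1 next.2
        else
          let cur' := pvSetCell current_grid x y (-1)
          pv_dfs_solve_rec grid fuel cur' next.1 next.2

def dfs_solve (grid : List (List Int)) (current_grid : List (List Int)) (x : Int) (y : Int) : Bool :=
  pv_dfs_solve_rec grid ((2 * grid.length + 2) * (2 * grid.length + 2) + 1) current_grid x y

-- ===== PORT B =====
-- fuel bound for the stack loop: pvT k dominates the number of pops needed to
-- resolve one entry whose path may still grow k times (1 pop + 4 sub-entries)
def pvT : Nat → Nat
  | 0 => 1
  | k + 1 => 1 + 4 * pvT k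

-- _find_island's while loop: pop the top entry, succeed when the path has reached
-- target size, else push the valid extensions of the walk in reversed direction
-- order (Python appends then pops from the end; head of the list is the top)
-- the loop body of the push loop: append the extension of the walk by one valid cell
def pv_push (cur : List (List Int)) (c : Int × Int) (path : PySem.Set (Int × Int))
    (st : List ((Int × Int) × PySem.Set (Int × Int))) (d : Int × Int) :
    List ((Int × Int) × PySem.Set (Int × Int)) :=
  let nx := c.1 + d.1
  let ny := c.2 + d.2
  if decide (0 ≤ nx) && decide (nx < (cur.length : Int)) &&
     decide (0 ≤ ny) && decide (ny < (cur.length : Int)) &&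
     (pvCell? cur nx ny == some 0) && !(PySem.Set.contains path (nx, ny)) then
    ((nx, ny), PySem.Set.add path (nx, ny)) :: st
  else st

def pv_find_island (cur : List (List Int)) (target : Int) :
    Nat → List ((Int × Int) × PySem.Set (Int × Int)) → Option (PySem.Set (Int × Int))
  | _, [] => none
  | 0, _ :: _ => none   -- fuel guard only; never reached for the fuel passed below
  | fuel + 1, (c, path) :: rest =>
    if ((path.length : Int) == target) then some path
    else
      pv_find_island cur target fuel
        ([((-1:Int),(0:Int)), (0,-1), (1,0), (0,1)].foldl (pv_push cur c path) rest)

def pv_dfs_solve_alt_rec (grid : List (List Int)) (fuel : Nat) (current_grid : List (List Int))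
    (x y : Int) : Bool :=
  match fuel with
  | 0 => false
  | fuel + 1 =>
    if (x == (grid.length : Int)) then true
    else
      let next := if (y + 1 == (grid.length : Int)) then (x + 1, (0 : Int)) else (x, y + 1)
      match pvCell? grid x y with
      | none => false   -- Python raises IndexError here; excluded by Pre_
      | some v =>
        -- unified placement: a set of cells and the value to write there
        let placement : Option (PySem.Set (Int × Int) × Int) :=
          if v > 0 then
            match pv_find_island current_grid v
                (pvT (current_grid.length * current_grid.length + 1))
                [((x, y), PySem.Set.add PySem.Set.empty (x, y))] with
            | none => none
            | some cells => some (cells, 1)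
          else some (PySem.Set.add PySem.Set.empty (x, y), -1)
        match placement with
        | none => false
        | some (cells, value) =>
          let cur' := cells.foldl (fun g c => pvSetCell g c.1 c.2 value) current_grid
          -- Source B's saved/restore loop only undoes mutation after ok is fixed
          pv_dfs_solve_alt_rec grid fuel cur' next.1 next.2

def dfs_solve_alt (grid : List (List Int)) (current_grid : List (List Int)) (x : Int) (y : Int) : Bool :=
  pv_dfs_solve_alt_rec grid ((2 * grid.length + 2) * (2 * grid.length + 2) + 1) current_grid x y

-- ===== PRECONDITION & SPEC =====
-- Pre_ restricts to grids on which every index A takes is defined: rows at least as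
-- long as their grid, current_grid at least as large as grid, and a start cell in
-- Python's (possibly negative, wrap-around) index range — or x equal to the
-- terminating row number.  Outside it A raises IndexError on some index, except on
-- some ragged grids whose row-major walk happens to end before the bad index; A
-- still returns there (and B returns the same value).
def Pre_dfs_solve (grid : List (List Int)) (current_grid : List (List Int)) (x : Int) (y : Int) : Prop :=
  x = (grid.length : Int) ∨
  (grid.length ≤ current_grid.length ∧
   (∀ r ∈ grid, grid.length ≤ r.length) ∧
   (∀ r ∈ current_grid, current_grid.length ≤ r.length) ∧
   -(grid.length : Int) ≤ x ∧ x < (grid.length : Int) ∧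
   -(grid.length : Int) ≤ y ∧ y < (grid.length : Int))
instance (grid : List (List Int)) (current_grid : List (List Int)) (x : Int) (y : Int) : Decidable (Pre_dfs_solve grid current_grid x y) := by unfold Pre_dfs_solve; infer_instance

def pvWitness_dfs_solve : List (List Int) × List (List Int) × Int × Int :=
  ([[2, 0], [0, 1]], [[0, 0], [0, 0]], 0, 0)

def Spec_dfs_solve (grid : List (List Int)) (current_grid : List (List Int)) (x : Int) (y : Int) (out : Bool) : Prop := out = dfs_solve_alt grid current_grid x y
instance (grid : List (List Int)) (current_grid : List (List Int)) (x : Int) (y : Int) (out : Bool) : Decidable (Spec_dfs_solve grid current_grid x y out) := by unfold Spec_dfs_solve; infer_instance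

-- ===== CLAIM (what is proved, stated in full; the proofs are below) =====
def Claim_equal_dfs_solve : Prop := ∀ (grid : List (List Int)) (current_grid : List (List Int)) (x : Int) (y : Int), Dom_dfs_solve grid current_grid x y → Pre_dfs_solve grid current_grid x y → Spec_dfs_solve grid current_grid x y (dfs_solve grid current_grid x y)

-- ===== LEMMAS AND PROOFS =====

-- A's result for one stack entry: run dfs_island on it with the fuel that matches
-- the entry's path length (n*n+2 - |path|), and take the first success
def pvFirst (cur : List (List Int)) (t : Int) :
    List ((Int × Int) × PySem.Set (Int × Int)) → Option (PySem.Set (Int × Int))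
  | [] => none
  | (c, p) :: rest =>
    match pv_dfs_island cur (cur.length * cur.length + 2 - p.length) c.1 c.2 t p with
    | (true, v) => some v
    | (false, _) => pvFirst cur t rest

-- one push of pv_push, as an Option: the child entry a direction contributes
def pv_mk (cur : List (List Int)) (c : Int × Int) (p : PySem.Set (Int × Int))
    (d : Int × Int) : Option ((Int × Int) × PySem.Set (Int × Int)) :=
  if pv_is_valid cur (c.1 + d.1) (c.2 + d.2) p then
    some ((c.1 + d.1, c.2 + d.2), PySem.Set.add p (c.1 + d.1, c.2 + d.2))
  else none

-- invariant of every path on the stack / visited set: no duplicates, and every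
-- cell is the start cell or lies in the n×n range
def pvInv (n : Nat) (s : Int × Int) (p : List (Int × Int)) : Prop :=
  p.Nodup ∧ ∀ q ∈ p, q = s ∨ (0 ≤ q.1 ∧ q.1 < (n : Int) ∧ 0 ≤ q.2 ∧ q.2 < (n : Int))

lemma pvT_pos (k : Nat) : 1 ≤ pvT k := by
  cases k <;> simp [pvT]

lemma pv_valid_not_mem (cur : List (List Int)) (nx ny : Int) (p : PySem.Set (Int × Int))
    (hv : pv_is_valid cur nx ny p = true) : (nx, ny) ∉ p := by
  simp only [pv_is_valid, Bool.and_eq_true] at hv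
  have h2 := hv.2
  simp only [Bool.not_eq_true'] at h2
  intro hm
  rw [(PySem.Set.contains_iff p _).mpr hm] at h2
  exact absurd h2 (by decide)

lemma pv_valid_range (cur : List (List Int)) (nx ny : Int) (p : PySem.Set (Int × Int))
    (hv : pv_is_valid cur nx ny p = true) :
    0 ≤ nx ∧ nx < (cur.length : Int) ∧ 0 ≤ ny ∧ ny < (cur.length : Int) := by
  simp only [pv_is_valid, Bool.and_eq_true, decide_eq_true_eq] at hv
  exact ⟨hv.1.1.1.1.1, hv.1.1.1.1.2, hv.1.1.1.2, hv.1.1.2⟩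

lemma pv_add_length (p : PySem.Set (Int × Int)) (a : Int × Int) (h : a ∉ p) :
    (PySem.Set.add p a).length = p.length + 1 := by
  rw [PySem.Set.add_of_not_mem h]
  simp

lemma pvInv_length_le (n : Nat) (s : Int × Int) (p : List (Int × Int))
    (h : pvInv n s p) : p.length ≤ n * n + 1 := by
  obtain ⟨hnd, hmem⟩ := h
  have hsub : p.toFinset ⊆ insert s ((Finset.Icc (0:ℤ) ((n:ℤ) - 1)) ×ˢ (Finset.Icc (0:ℤ) ((n:ℤ) - 1))) := by
    intro q hq
    rcases hmem q (List.mem_toFinset.mp hq) with h | h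
    · simp [h]
    · refine Finset.mem_insert_of_mem ?_
      simp only [Finset.mem_product, Finset.mem_Icc]
      omega
  have hcard := Finset.card_le_card hsub
  have h1 : p.toFinset.card = p.length := List.toFinset_card_of_nodup hnd
  have h2 : ((Finset.Icc (0:ℤ) ((n:ℤ) - 1)) ×ˢ (Finset.Icc (0:ℤ) ((n:ℤ) - 1))).card = n * n := by
    rw [Finset.card_product, Int.card_Icc]
    simp
  have h3 := Finset.card_insert_le s ((Finset.Icc (0:ℤ) ((n:ℤ) - 1)) ×ˢ (Finset.Icc (0:ℤ) ((n:ℤ) - 1)))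
  omega

lemma pvFirst_append (cur : List (List Int)) (t : Int)
    (a b : List ((Int × Int) × PySem.Set (Int × Int))) :
    pvFirst cur t (a ++ b) =
      match pvFirst cur t a with
      | some v => some v
      | none => pvFirst cur t b := by
  induction a with
  | nil => simp [pvFirst]
  | cons e rest ih =>
    obtain ⟨c, p⟩ := e
    simp only [List.cons_append, pvFirst]
    cases pv_dfs_island cur (cur.length * cur.length + 2 - p.length) c.1 c.2 t p with
    | mk b' v => cases b' <;> simp [ih]

-- folding the conditional pushes onto the stack = the child entries, reversed,
-- on top of the old stack
lemma pv_push_foldl (cur : List (List Int)) (c : Int × Int) (p : PySem.Set (Int × Int)) :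
    ∀ (l : List (Int × Int)) (rest : List ((Int × Int) × PySem.Set (Int × Int))),
      l.foldl (pv_push cur c p) rest = (l.reverse.filterMap (pv_mk cur c p)) ++ rest := by
  intro l
  induction l with
  | nil => intro rest; simp
  | cons d l ih =>
    intro rest
    simp only [List.foldl_cons, List.reverse_cons, List.filterMap_append, List.append_assoc]
    rw [ih]
    by_cases h : pv_is_valid cur (c.1 + d.1) (c.2 + d.2) p
    · have hb : pv_push cur c p rest d = ((c.1 + d.1, c.2 + d.2), PySem.Set.add p (c.1 + d.1, c.2 + d.2)) :: rest := by
        simp only [pv_push]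
        rw [if_pos (by simpa [pv_is_valid] using h)]
      simp [hb, pv_mk, h]
    · have hb : pv_push cur c p rest d = rest := by
        simp only [pv_push]
        rw [if_neg (by simpa [pv_is_valid] using h)]
      simp [hb, pv_mk, h]

-- the direction loop of dfs_island, at the fuel matched to the extended paths,
-- is pvFirst over the valid child entries
lemma pv_trydirs_eq (cur : List (List Int)) (t : Int) (c : Int × Int)
    (p : PySem.Set (Int × Int)) :
    ∀ dirs : List (Int × Int),
      pv_try_dirs cur (cur.length * cur.length + 2 - p.length - 1) c.1 c.2 t p dirs =
        pvFirst cur t (dirs.filterMap (pv_mk cur c p)) := by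
  intro dirs
  induction dirs with
  | nil => simp [pv_try_dirs, pvFirst]
  | cons d rest ih =>
    by_cases hv : pv_is_valid cur (c.1 + d.1) (c.2 + d.2) p
    · have hnm := pv_valid_not_mem cur (c.1 + d.1) (c.2 + d.2) p hv
      have hlen := pv_add_length p (c.1 + d.1, c.2 + d.2) hnm
      have hmk : pv_mk cur c p d = some ((c.1 + d.1, c.2 + d.2), PySem.Set.add p (c.1 + d.1, c.2 + d.2)) := by
        simp [pv_mk, hv]
      simp only [pv_try_dirs, hv, if_pos, List.filterMap_cons, hmk, pvFirst, hlen]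
      have hfe : cur.length * cur.length + 2 - (p.length + 1) =
          cur.length * cur.length + 2 - p.length - 1 := by omega
      rw [hfe]
      cases pv_dfs_island cur (cur.length * cur.length + 2 - p.length - 1)
          (c.1 + d.1) (c.2 + d.2) t (PySem.Set.add p (c.1 + d.1, c.2 + d.2)) with
      | mk b' v => cases b' <;> simp [ih]
    · have hmk : pv_mk cur c p d = none := by simp [pv_mk, hv]
      simp only [pv_try_dirs, hv, Bool.false_eq_true, if_neg, not_false_eq_true,
        List.filterMap_cons, hmk, ih]

-- main correspondence: the explicit-stack loop, with enough fuel, computes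
-- pvFirst of the stack
lemma pv_main (cur : List (List Int)) (t : Int) (s : Int × Int) :
    ∀ (fB : Nat) (stack : List ((Int × Int) × PySem.Set (Int × Int))),
      (∀ e ∈ stack, pvInv cur.length s e.2) →
      ((stack.map (fun e => pvT (cur.length * cur.length + 2 - e.2.length))).sum ≤ fB) →
      pv_find_island cur t fB stack = pvFirst cur t stack := by
  intro fB
  induction fB with
  | zero =>
    intro stack hinv hcost
    cases stack with
    | nil => simp [pv_find_island, pvFirst]
    | cons e rest =>
      exfalso
      have := pvT_pos (cur.length * cur.length + 2 - e.2.length)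
      simp only [List.map_cons, List.sum_cons, Nat.le_zero] at hcost
      omega
  | succ fB ih =>
    intro stack hinv hcost
    cases stack with
    | nil => simp [pv_find_island, pvFirst]
    | cons e rest =>
      obtain ⟨c, p⟩ := e
      have hinvp : pvInv cur.length s p := hinv (c, p) List.mem_cons_self
      have hplen : p.length ≤ cur.length * cur.length + 1 :=
        pvInv_length_le cur.length s p hinvp
      obtain ⟨g, hg⟩ : ∃ g, cur.length * cur.length + 2 - p.length = g + 1 :=
        ⟨cur.length * cur.length + 2 - p.length - 1, by omega⟩
      by_cases ht : ((p.length : Int) == t) = true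
      · -- target size reached: both sides succeed with this path
        have hB : pv_find_island cur t (fB + 1) ((c, p) :: rest) = some p := by
          simp [pv_find_island, ht]
        have hA : pvFirst cur t ((c, p) :: rest) = some p := by
          simp only [pvFirst, hg]
          simp [pv_dfs_island, ht]
        rw [hB, hA]
      · -- expand: the pushed children, in A's direction order, on top of the rest
        simp only [pv_find_island, ht, Bool.false_eq_true, if_neg, not_false_eq_true]
        rw [pv_push_foldl]
        have hrev : ([((-1:Int),(0:Int)), (0,-1), (1,0), (0,1)] : List (Int × Int)).reverse =
            [((0:Int),(1:Int)), (1,0), (0,-1), (-1,0)] := by decide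
        rw [hrev]
        have hchInv : ∀ e' ∈ ([((0:Int),(1:Int)), (1,0), (0,-1), (-1,0)] : List (Int × Int)).filterMap (pv_mk cur c p),
            pvInv cur.length s e'.2 := by
          intro e' he'
          obtain ⟨d, _, hde⟩ := List.mem_filterMap.mp he'
          by_cases hv : pv_is_valid cur (c.1 + d.1) (c.2 + d.2) p
          · simp only [pv_mk, hv, if_pos, Option.some.injEq] at hde
            have hrange := pv_valid_range cur (c.1 + d.1) (c.2 + d.2) p hv
            constructor
            · rw [← hde]
              exact PySem.Set.nodup_add p _ hinvp.1
            · intro q hq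
              rw [← hde] at hq
              rcases (PySem.Set.mem_add p _ q).mp hq with hq | hq
              · exact hinvp.2 q hq
              · right
                subst hq
                exact hrange
          · simp [pv_mk, hv] at hde
        have hchLen : ∀ e' ∈ ([((0:Int),(1:Int)), (1,0), (0,-1), (-1,0)] : List (Int × Int)).filterMap (pv_mk cur c p),
            e'.2.length = p.length + 1 := by
          intro e' he'
          obtain ⟨d, _, hde⟩ := List.mem_filterMap.mp he'
          by_cases hv : pv_is_valid cur (c.1 + d.1) (c.2 + d.2) p
          · simp only [pv_mk, hv, if_pos, Option.some.injEq] at hde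
            rw [← hde]
            exact pv_add_length p _ (pv_valid_not_mem cur _ _ p hv)
          · simp [pv_mk, hv] at hde
        have hcost' : (((([((0:Int),(1:Int)), (1,0), (0,-1), (-1,0)] : List (Int × Int)).filterMap (pv_mk cur c p)) ++ rest).map
            (fun e' => pvT (cur.length * cur.length + 2 - e'.2.length))).sum ≤ fB := by
          have hcsum : ((([((0:Int),(1:Int)), (1,0), (0,-1), (-1,0)] : List (Int × Int)).filterMap (pv_mk cur c p)).map
              (fun e' => pvT (cur.length * cur.length + 2 - e'.2.length))).sum ≤ 4 * pvT g := by
            have hall : ∀ z ∈ (([((0:Int),(1:Int)), (1,0), (0,-1), (-1,0)] : List (Int × Int)).filterMap (pv_mk cur c p)).map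
                (fun e' => pvT (cur.length * cur.length + 2 - e'.2.length)), z = pvT g := by
              intro z hz
              obtain ⟨e', he', rfl⟩ := List.mem_map.mp hz
              have := hchLen e' he'
              congr 1
              omega
            rw [List.sum_eq_card_nsmul _ (pvT g) hall]
            simp only [List.length_map, smul_eq_mul]
            have hc4 := List.length_filterMap_le (pv_mk cur c p) ([((0:Int),(1:Int)), (1,0), (0,-1), (-1,0)] : List (Int × Int))
            exact Nat.mul_le_mul_right _ (by simpa using hc4)
          have hT : pvT (cur.length * cur.length + 2 - p.length) = 1 + 4 * pvT g := by
            rw [hg]; simp [pvT]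
          simp only [List.map_cons, List.sum_cons, hT] at hcost
          simp only [List.map_append, List.sum_append]
          omega
        have hinv' : ∀ e' ∈ (([((0:Int),(1:Int)), (1,0), (0,-1), (-1,0)] : List (Int × Int)).filterMap (pv_mk cur c p)) ++ rest,
            pvInv cur.length s e'.2 := by
          intro e' he'
          rcases List.mem_append.mp he' with h | h
          exacts [hchInv e' h, hinv e' (List.mem_cons_of_mem _ h)]
        rw [ih _ hinv' hcost']
        rw [pvFirst_append]
        have hA : pvFirst cur t ((c, p) :: rest) =
            match pv_try_dirs cur g c.1 c.2 t p [((0:Int),(1:Int)), (1,0), (0,-1), (-1,0)] with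
            | some v => some v
            | none => pvFirst cur t rest := by
          simp only [pvFirst, hg, pv_dfs_island, ht, Bool.false_eq_true, if_neg,
            not_false_eq_true]
          cases pv_try_dirs cur g c.1 c.2 t p [((0:Int),(1:Int)), (1,0), (0,-1), (-1,0)] <;> simp
        rw [hA]
        have hgval : g = cur.length * cur.length + 2 - p.length - 1 := by omega
        rw [hgval, pv_trydirs_eq cur t c p]

-- the two top-level island searches agree
lemma pv_island_top (cur : List (List Int)) (x y t : Int) :
    pv_find_island cur t (pvT (cur.length * cur.length + 1))
        [((x, y), PySem.Set.add PySem.Set.empty (x, y))] =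
      match pv_dfs_island cur (cur.length * cur.length + 1) x y t
          (PySem.Set.add PySem.Set.empty (x, y)) with
      | (true, v) => some v
      | (false, _) => none := by
  have hS : (PySem.Set.add PySem.Set.empty (x, y) : PySem.Set (Int × Int)) = [(x, y)] := rfl
  have he1 : cur.length * cur.length + 2 - 1 = cur.length * cur.length + 1 := by omega
  have h1 : ∀ e ∈ ([((x, y), PySem.Set.add PySem.Set.empty (x, y))] :
      List ((Int × Int) × PySem.Set (Int × Int))), pvInv cur.length (x, y) e.2 := by
    intro e he
    simp only [List.mem_singleton] at he
    subst he
    constructor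
    · rw [hS]; simp
    · intro q hq
      rw [hS] at hq
      simp only [List.mem_singleton] at hq
      exact Or.inl hq
  have h2 : ((([((x, y), PySem.Set.add PySem.Set.empty (x, y))] :
      List ((Int × Int) × PySem.Set (Int × Int)))).map
      (fun e => pvT (cur.length * cur.length + 2 - e.2.length))).sum ≤
      pvT (cur.length * cur.length + 1) := by
    rw [hS]
    simp only [List.map_cons, List.map_nil, List.sum_cons, List.sum_nil,
      List.length_cons, List.length_nil, he1]
    omega
  rw [pv_main cur t (x, y) (pvT (cur.length * cur.length + 1)) _ h1 h2]
  simp only [pvFirst, hS, List.length_cons, List.length_nil, he1]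

-- the two solvers agree at every fuel, on every input
lemma pv_solve_eq (grid : List (List Int)) :
    ∀ (fuel : Nat) (cur : List (List Int)) (x y : Int),
      pv_dfs_solve_rec grid fuel cur x y = pv_dfs_solve_alt_rec grid fuel cur x y := by
  intro fuel
  induction fuel with
  | zero => intro cur x y; rfl
  | succ fuel ih =>
    intro cur x y
    simp only [pv_dfs_solve_rec, pv_dfs_solve_alt_rec]
    by_cases hx : (x == (grid.length : Int)) = true
    · simp [hx]
    · simp only [hx, Bool.false_eq_true, if_neg, not_false_eq_true]
      cases hc : pvCell? grid x y with
      | none => rfl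
      | some v =>
        by_cases hv : v > 0
        · simp only [hv, if_pos]
          rw [pv_island_top cur x y v]
          cases hisl : pv_dfs_island cur (cur.length * cur.length + 1) x y v
              (PySem.Set.add PySem.Set.empty (x, y)) with
          | mk b vis => cases b <;> simp [ih]
        · simp only [hv, if_neg, not_false_eq_true]
          exact ih _ _ _

-- ===== VERDICT (by name: the statement is the Claim_ definition above) =====
theorem dfs_solve_spec : Claim_equal_dfs_solve := by
  intro grid current_grid x y _hdom _hpre
  show dfs_solve grid current_grid x y = dfs_solve_alt grid current_grid x y
  exact pv_solve_eq grid _ current_grid x y
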